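-- pv_equiv track=rewrite | github.com/Koohyewon/algorithm | 백준/Silver/14405. 피카츄/피카츄.py | can_pikachu
-- ===== SOURCE A (Python) =====
-- def can_pikachu(s):
--     i = 0
--     n = len(s)
--
--     while i < n:
--         if s[i:i+2] == "pi":
--             i += 2
--         elif s[i:i+2] == "ka":
--             i += 2
--         elif s[i:i+3] == "chu":
--             i += 3
--         else:
--             return "NO"
--
--     return "YES"
-- ===== SOURCE B (Python) =====
-- import re
--
-- def can_pikachu(s):
--     return "YES" if re.fullmatch(r"(pi|ka|chu)*", s) else "NO"
-- ===== Notes on version B (the rewrite author's own statement) =====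
-- stated objective: idiomatic
-- what changed: Replaced the manual index/slice while-loop with a single anchored regex full-match of the alternation (pi|ka|chu)*.
import Mathlib
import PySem

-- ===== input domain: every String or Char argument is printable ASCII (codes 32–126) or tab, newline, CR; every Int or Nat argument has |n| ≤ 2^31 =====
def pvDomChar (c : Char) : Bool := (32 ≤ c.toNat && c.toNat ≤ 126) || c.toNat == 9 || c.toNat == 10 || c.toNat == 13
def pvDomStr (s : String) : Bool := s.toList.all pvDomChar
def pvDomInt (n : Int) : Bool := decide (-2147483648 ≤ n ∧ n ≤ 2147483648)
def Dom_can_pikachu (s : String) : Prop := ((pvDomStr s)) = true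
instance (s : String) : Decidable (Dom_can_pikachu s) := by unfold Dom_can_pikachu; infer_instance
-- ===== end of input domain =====

-- B replaces A's manual index/slice while-loop with an anchored regex full-match of (pi|ka|chu)* (idiomatic; same O(n) cost).


-- ===== PORT A =====
-- the while-loop of A: state is the index i; slices s[i:i+2] / s[i:i+3] via PySem.List.slice
def pvLoopA (l : List Char) (n : Nat) (i : Nat) : String :=
  if i < n then
    if PySem.List.slice l (some (i : Int)) (some ((i : Int) + 2)) = ['p','i'] then
      pvLoopA l n (i + 2)
    else if PySem.List.slice l (some (i : Int)) (some ((i : Int) + 2)) = ['k','a'] then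
      pvLoopA l n (i + 2)
    else if PySem.List.slice l (some (i : Int)) (some ((i : Int) + 3)) = ['c','h','u'] then
      pvLoopA l n (i + 3)
    else "NO"
  else "YES"
termination_by n - i
decreasing_by all_goals omega

def can_pikachu (s : String) : String :=
  pvLoopA s.toList s.toList.length 0

-- ===== PORT B =====
-- Hand port of re.fullmatch(r"(pi|ka|chu)*", s): the backtracking engine tries the
-- alternatives pi, ka, chu in order at each position; since their first letters are
-- distinct, at most one alternative can apply at any position, and stopping the star
-- early leaves unmatched input (fullmatch fails), so the engine's search is exactly
-- this consumption of one applicable token per step. Exact for this fixed pattern.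
def pvFullmatchStar : List Char → Bool
  | [] => true
  | 'p' :: 'i' :: rest => pvFullmatchStar rest
  | 'k' :: 'a' :: rest => pvFullmatchStar rest
  | 'c' :: 'h' :: 'u' :: rest => pvFullmatchStar rest
  | _ => false

def can_pikachu_alt (s : String) : String :=
  if pvFullmatchStar s.toList then "YES" else "NO"

-- ===== PRECONDITION & SPEC =====
def Spec_can_pikachu (s : String) (out : String) : Prop := out = can_pikachu_alt s
instance (s : String) (out : String) : Decidable (Spec_can_pikachu s out) := by unfold Spec_can_pikachu; infer_instance

-- ===== CLAIM (what is proved, stated in full; the proofs are below) =====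
def Claim_equal_can_pikachu : Prop := ∀ (s : String), Dom_can_pikachu s → Spec_can_pikachu s (can_pikachu s)

-- ===== LEMMAS AND PROOFS =====

theorem pvSlice_take (l : List Char) (i k : Nat) :
    PySem.List.slice l (some (i : Int)) (some ((i : Int) + (k : Int))) = (l.drop i).take k :=
  PySem.List.slice_natCast_add l i k

theorem pvLoopA_eq (l : List Char) (i : Nat) :
    pvLoopA l l.length i = (if pvFullmatchStar (l.drop i) then "YES" else "NO") := by
  obtain ⟨fuel, hfuel⟩ : ∃ f, l.length - i ≤ f := ⟨l.length - i, le_refl _⟩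
  induction fuel generalizing i with
  | zero =>
    have hge : l.length ≤ i := by omega
    rw [pvLoopA]
    simp [Nat.not_lt.mpr hge, List.drop_eq_nil_of_le hge, pvFullmatchStar]
  | succ m ih =>
    by_cases hlt : i < l.length
    case neg =>
      rw [pvLoopA]
      have hge : l.length ≤ i := by omega
      simp [Nat.not_lt.mpr hge, List.drop_eq_nil_of_le hge, pvFullmatchStar]
    rw [pvLoopA]
    have h2 : ((i : Int) + 2) = ((i : Int) + ((2 : Nat) : Int)) := by norm_num
    have h3 : ((i : Int) + 3) = ((i : Int) + ((3 : Nat) : Int)) := by norm_num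
    rw [if_pos hlt, h2, h3, pvSlice_take, pvSlice_take]
    have hd2 : l.drop (i + 2) = (l.drop i).drop 2 := by
      rw [List.drop_drop]
    have hd3 : l.drop (i + 3) = (l.drop i).drop 3 := by
      rw [List.drop_drop]
    -- case on the shape of the remaining suffix (up to 3 chars)
    rcases hm : l.drop i with _ | ⟨a, _ | ⟨b, rest⟩⟩
    · exfalso
      have := congrArg List.length hm
      simp only [List.length_drop, List.length_nil] at this
      omega
    · -- one char left: no 2-slice can equal a token; 3-slice has length 1
      simp [pvFullmatchStar]
    · -- at least two chars
      by_cases hpi : a = 'p' ∧ b = 'i'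
      · obtain ⟨rfl, rfl⟩ := hpi
        simp only [List.take, if_true]
        rw [ih (i + 2) (by omega), hd2, hm]
        simp [pvFullmatchStar]
      · by_cases hka : a = 'k' ∧ b = 'a'
        · obtain ⟨rfl, rfl⟩ := hka
          simp only [List.take, if_true]
          rw [ih (i + 2) (by omega), hd2, hm]
          simp [pvFullmatchStar]
        · -- first two chars are not pi/ka: only chu can apply
          rcases hr : rest with _ | ⟨c, rest'⟩
          · -- exactly two chars: 3-slice is those two chars, length 2 ≠ 3
            subst hr
            simp only [List.take]
            rw [if_neg (by simp; intro h1 h2; exact hpi ⟨h1, h2⟩),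
                if_neg (by simp; intro h1 h2; exact hka ⟨h1, h2⟩),
                if_neg (by simp)]
            rcases a <;> rcases b;
              simp_all [pvFullmatchStar]
          · subst hr
            by_cases hchu : a = 'c' ∧ b = 'h' ∧ c = 'u'
            · obtain ⟨rfl, rfl, rfl⟩ := hchu
              simp only [List.take, if_true]
              rw [ih (i + 3) (by omega), hd3, hm]
              simp [pvFullmatchStar]
            · simp only [List.take]
              rw [if_neg (by simp; intro h1 h2; exact hpi ⟨h1, h2⟩),
                  if_neg (by simp; intro h1 h2; exact hka ⟨h1, h2⟩),
                  if_neg (by simp; intro h1 h2 h3; exact hchu ⟨h1, h2, h3⟩)]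
              have : pvFullmatchStar (a :: b :: c :: rest') = false := by
                rcases a <;> rcases b <;> rcases c;
                  simp_all [pvFullmatchStar]
              simp [this]

-- ===== VERDICT (by name: the statement is the Claim_ definition above) =====
theorem can_pikachu_spec : Claim_equal_can_pikachu := by
  intro s _
  unfold Spec_can_pikachu can_pikachu can_pikachu_alt
  rw [pvLoopA_eq]
  simp
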